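-- pv_equiv track=rewrite | github.com/cbeach512/dailycodingproblem | day35.py | prism
-- ===== SOURCE A (Python) =====
-- R = 'R'
--
-- G = 'G'
--
-- def prism(rgb):
--     reds = 0
--     greens = 0
--     for i in range(len(rgb)):
--         if rgb[-1] == R:
--             rgb.insert(0, rgb.pop())
--             reds += 1
--         elif rgb[-1] == G:
--             rgb.insert(reds, rgb.pop())
--             greens += 1
--         else:
--             rgb.insert(reds + greens, rgb.pop())
--     return rgb
-- ===== SOURCE B (Python) =====
-- R = 'R'
--
-- G = 'G'
--
-- def prism(rgb):
--     # One stable in-place key-sort: R -> 0, G -> 1, other -> 2.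
--     rgb.sort(key=lambda c: 0 if c == R else (1 if c == G else 2))
--     return rgb
-- ===== Notes on version B (the rewrite author's own statement) =====
-- stated objective: faster
-- what changed: Replaced the pop/insert rotation loop (each insert at the front is O(n), n passes) with a single in-place stable sort by the key R->0, G->1, other->2; stability preserves the relative order of the non-R/G elements exactly as A does.
import Mathlib
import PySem

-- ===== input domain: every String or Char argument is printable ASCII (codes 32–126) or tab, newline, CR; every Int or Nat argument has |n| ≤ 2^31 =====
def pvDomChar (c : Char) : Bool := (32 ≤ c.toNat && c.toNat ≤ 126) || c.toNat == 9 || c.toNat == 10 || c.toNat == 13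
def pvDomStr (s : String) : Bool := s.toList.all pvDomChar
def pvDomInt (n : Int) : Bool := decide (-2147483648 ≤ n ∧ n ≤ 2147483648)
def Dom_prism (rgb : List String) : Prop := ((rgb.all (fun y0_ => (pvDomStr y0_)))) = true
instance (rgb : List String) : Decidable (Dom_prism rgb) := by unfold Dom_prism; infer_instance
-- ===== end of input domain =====

-- B replaces A's pop/insert rotation loop with one in-place stable key-sort (R->0, G->1, other->2); simpler.
-- A mutates its argument in place (pop/insert); B sorts in place — the theorems below are about the RETURN value.

-- ===== PORT A =====
-- for i in range(len(rgb)):  each pass pops the last element (= rgb[-1]) and re-inserts it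
-- at position 0 / reds / reds+greens.  The list length is invariant across a pass, so the
-- loop body never sees an empty list; the 'none' branch of pop? is unreachable from prism.
def prismLoop : Nat → List String → Int → Int → List String
  | 0, rgb, _, _ => rgb
  | n + 1, rgb, reds, greens =>
    match PySem.List.pop? rgb with
    | none => rgb
    | some (x, rest) =>
      if x = "R" then
        prismLoop n (PySem.List.insert rest 0 x) (reds + 1) greens
      else if x = "G" then
        prismLoop n (PySem.List.insert rest reds x) reds (greens + 1)
      else
        prismLoop n (PySem.List.insert rest (reds + greens) x) reds greens

def prism (rgb : List String) : List String := prismLoop rgb.length rgb 0 0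

-- ===== PORT B =====
-- rgb.sort(key=lambda c: 0 if c == 'R' else (1 if c == 'G' else 2)); return rgb
def keyB (c : String) : Int := if c = "R" then 0 else if c = "G" then 1 else 2

def prism_alt (rgb : List String) : List String := PySem.List.sorted rgb keyB

-- ===== PRECONDITION & SPEC =====
def Spec_prism (rgb : List String) (out : List String) : Prop := out = prism_alt rgb
instance (rgb : List String) (out : List String) : Decidable (Spec_prism rgb out) := by unfold Spec_prism; infer_instance

-- ===== CLAIM (what is proved, stated in full; the proofs are below) =====
def Claim_equal_prism : Prop := ∀ (rgb : List String), Dom_prism rgb → Spec_prism rgb (prism rgb)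

-- ===== LEMMAS AND PROOFS =====

-- the common closed form: stable three-way partition
def part3 (xs : List String) : List String :=
  xs.filter (· == "R") ++ xs.filter (· == "G")
    ++ xs.filter (fun x => !(x == "R") && !(x == "G"))

lemma insert_append_length (A B : List String) (v : String) :
    PySem.List.insert (A ++ B) (A.length : Int) v = A ++ v :: B := by
  rw [PySem.List.insert_natCast (A ++ B) A.length v (by simp)]
  simp

lemma prismLoop_inv : ∀ (rest Rs Gs Os : List String),
    (∀ x ∈ Rs, x = "R") → (∀ x ∈ Gs, x = "G") → (∀ x ∈ Os, x ≠ "R" ∧ x ≠ "G") →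
    prismLoop rest.length (Rs ++ Gs ++ Os ++ rest) (Rs.length : Int) (Gs.length : Int)
      = (rest.filter (· == "R") ++ Rs) ++ (rest.filter (· == "G") ++ Gs)
        ++ (rest.filter (fun x => !(x == "R") && !(x == "G")) ++ Os) := by
  intro rest
  induction rest using List.reverseRecOn with
  | nil => intro Rs Gs Os _ _ _; simp [prismLoop]
  | append_singleton rest' x ih =>
    intro Rs Gs Os hR hG hO
    have hpop : PySem.List.pop? (Rs ++ Gs ++ Os ++ (rest' ++ [x]))
        = some (x, Rs ++ Gs ++ Os ++ rest') := by
      have := PySem.List.pop?_last (Rs ++ Gs ++ Os ++ rest') x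
      simpa [List.append_assoc] using this
    have hlen : (rest' ++ [x]).length = rest'.length + 1 := by simp
    rw [hlen]
    simp only [prismLoop, hpop]
    by_cases hx : x = "R"
    · subst hx
      rw [if_pos rfl, PySem.List.insert_zero]
      have : ("R" :: (Rs ++ Gs ++ Os ++ rest')) = ("R" :: Rs) ++ Gs ++ Os ++ rest' := by simp
      rw [this]
      have hcast : ((Rs.length : Int) + 1) = (("R" :: Rs).length : Int) := by
        simp [List.length_cons]
      rw [hcast, ih ("R" :: Rs) Gs Os (by
        intro y hy
        rcases List.mem_cons.mp hy with h | h
        · exact h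
        · exact hR y h) hG hO]
      simp [List.filter_append]
    · by_cases hx2 : x = "G"
      · subst hx2
        rw [if_neg hx, if_pos rfl]
        have : (Rs ++ Gs ++ Os ++ rest') = Rs ++ (Gs ++ Os ++ rest') := by simp
        rw [this, insert_append_length Rs (Gs ++ Os ++ rest') "G"]
        have : (Rs ++ "G" :: (Gs ++ Os ++ rest')) = Rs ++ ("G" :: Gs) ++ Os ++ rest' := by simp
        rw [this]
        have hcast : ((Gs.length : Int) + 1) = (("G" :: Gs).length : Int) := by
          simp [List.length_cons]
        rw [hcast, ih Rs ("G" :: Gs) Os hR (by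
          intro y hy
          rcases List.mem_cons.mp hy with h | h
          · exact h
          · exact hG y h) hO]
        simp [List.filter_append]
      · rw [if_neg hx, if_neg hx2]
        have hcast : (Rs.length : Int) + (Gs.length : Int) = ((Rs ++ Gs).length : Int) := by simp
        have hsplit : (Rs ++ Gs ++ Os ++ rest') = (Rs ++ Gs) ++ (Os ++ rest') := by simp
        rw [hcast, hsplit, insert_append_length (Rs ++ Gs) (Os ++ rest') x]
        have : ((Rs ++ Gs) ++ x :: (Os ++ rest')) = Rs ++ Gs ++ (x :: Os) ++ rest' := by simp
        rw [this]
        rw [ih Rs Gs (x :: Os) hR hG (by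
          intro y hy
          rcases List.mem_cons.mp hy with h | h
          · subst h; exact ⟨hx, hx2⟩
          · exact hO y h)]
        simp [List.filter_append, hx, hx2]

lemma prism_eq_part3 (rgb : List String) : prism rgb = part3 rgb := by
  have := prismLoop_inv rgb [] [] [] (by simp) (by simp) (by simp)
  simpa [prism, part3] using this

-- B side: characterise the stable insertion sort with a three-valued key
lemma insertBy_forall_before (before : String → String → Bool) (x : String) (ys : List String)
    (h : ∀ y ∈ ys, before x y = true) :
    PySem.List.insertBy before x ys = x :: ys := by
  cases ys with
  | nil => rfl
  | cons y ys => simp [PySem.List.insertBy, h y (by simp)]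

lemma insertBy_append_not_before (before : String → String → Bool) (x : String)
    (pre rest : List String) (h : ∀ y ∈ pre, before x y = false) :
    PySem.List.insertBy before x (pre ++ rest) = pre ++ PySem.List.insertBy before x rest := by
  induction pre with
  | nil => simp
  | cons p ps ih =>
    have hp : before x p = false := h p (by simp)
    have hrec := ih (fun y hy => h y (List.mem_cons_of_mem _ hy))
    have hdef : PySem.List.insertBy before x (p :: (ps ++ rest))
        = if before x p = true then x :: p :: (ps ++ rest)
          else p :: PySem.List.insertBy before x (ps ++ rest) := rfl
    simp only [List.cons_append, hdef, hp]
    simp [hrec]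

lemma foldl_insertBy_inv : ∀ (xs a0 a1 a2 : List String),
    (∀ y ∈ a0, y = "R") → (∀ y ∈ a1, y = "G") → (∀ y ∈ a2, y ≠ "R" ∧ y ≠ "G") →
    xs.foldl (fun acc x => PySem.List.insertBy (fun a b => decide (keyB a < keyB b)) x acc)
        (a0 ++ a1 ++ a2)
      = (a0 ++ xs.filter (· == "R")) ++ (a1 ++ xs.filter (· == "G"))
        ++ (a2 ++ xs.filter (fun x => !(x == "R") && !(x == "G"))) := by
  intro xs
  induction xs with
  | nil => intro a0 a1 a2 _ _ _; simp
  | cons x xs ih =>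
    intro a0 a1 a2 h0 h1 h2
    simp only [List.foldl_cons]
    by_cases hx : x = "R"
    · subst hx
      have hstep : PySem.List.insertBy (fun a b => decide (keyB a < keyB b)) "R" (a0 ++ a1 ++ a2)
          = (a0 ++ ["R"]) ++ a1 ++ a2 := by
        rw [List.append_assoc, insertBy_append_not_before _ _ a0 (a1 ++ a2)
          (by intro y hy; simp [keyB, h0 y hy])]
        rw [insertBy_forall_before _ _ (a1 ++ a2) (by
          intro y hy
          rcases List.mem_append.mp hy with h | h
          · simp [keyB, h1 y h]
          · rcases h2 y h with ⟨hr, hg⟩; simp [keyB, hr, hg])]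
        simp
      rw [hstep, ih (a0 ++ ["R"]) a1 a2 (by
        intro y hy
        rcases List.mem_append.mp hy with h | h
        · exact h0 y h
        · simpa using h) h1 h2]
      simp
    · by_cases hx2 : x = "G"
      · subst hx2
        have hstep : PySem.List.insertBy (fun a b => decide (keyB a < keyB b)) "G" (a0 ++ a1 ++ a2)
            = a0 ++ (a1 ++ ["G"]) ++ a2 := by
          rw [insertBy_append_not_before _ _ (a0 ++ a1) a2 (by
            intro y hy
            rcases List.mem_append.mp hy with h | h
            · simp [keyB, h0 y h]
            · simp [keyB, h1 y h])]
          rw [insertBy_forall_before _ _ a2 (by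
            intro y hy; rcases h2 y hy with ⟨hr, hg⟩; simp [keyB, hr, hg])]
          simp
        rw [hstep, ih a0 (a1 ++ ["G"]) a2 h0 (by
          intro y hy
          rcases List.mem_append.mp hy with h | h
          · exact h1 y h
          · simpa using h) h2]
        simp
      · have hstep : PySem.List.insertBy (fun a b => decide (keyB a < keyB b)) x (a0 ++ a1 ++ a2)
            = a0 ++ a1 ++ (a2 ++ [x]) := by
          rw [PySem.List.insertBy_of_forall_not_before _ _ (a0 ++ a1 ++ a2) (by
            intro y hy
            rcases List.mem_append.mp hy with h | h
            · rcases List.mem_append.mp h with h' | h'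
              · simp [keyB, h0 y h', hx, hx2]
              · simp [keyB, h1 y h', hx, hx2]
            · rcases h2 y h with ⟨hr, hg⟩; simp [keyB, hr, hg, hx, hx2])]
          simp
        rw [hstep, ih a0 a1 (a2 ++ [x]) h0 h1 (by
          intro y hy
          rcases List.mem_append.mp hy with h | h
          · exact h2 y h
          · simp at h; subst h; exact ⟨hx, hx2⟩)]
        simp [hx, hx2]

lemma prism_alt_eq_part3 (rgb : List String) : prism_alt rgb = part3 rgb := by
  have hs := PySem.List.sorted_eq_foldl_insertBy rgb keyB
  have := foldl_insertBy_inv rgb [] [] [] (by simp) (by simp) (by simp)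
  simp only [List.nil_append, List.append_nil] at this
  simp [prism_alt, part3, hs, this]

-- ===== VERDICT (by name: the statement is the Claim_ definition above) =====
theorem prism_spec : Claim_equal_prism := by
  intro rgb _
  unfold Spec_prism
  rw [prism_eq_part3, prism_alt_eq_part3]
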